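-- pv_equiv track=rewrite | github.com/jerrycui2007/CCC-Senior-Solutions | 1997/S2 Nasty Numbers.py | is_nasty_number
-- ===== SOURCE A (Python) =====
-- from math import isqrt
--
-- def is_nasty_number(n: int) -> bool:
--     """Determine if a number is nasty.
--
--     A number is nasty if it has two different pairs of factors (a,b) and (c,d)
--     where a*b = c*d = n and either:
--     - a + b = c - d, or
--     - a + b = d - c
--
--     Args:
--         n: Number to check
--
--     Returns:
--         True if the number is nasty, False otherwise
--     """
--     sums = set()
--     diffs = set()
--
--     # Get all factors
--     for i in range(1, isqrt(n) + 1):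
--         if n % i == 0:
--             j = n // i
--             curr_sum = i + j
--             curr_diff = abs(j - i)
--
--             if curr_sum in diffs or curr_diff in sums:
--                 return True
--
--             sums.add(curr_sum)
--             diffs.add(curr_diff)
--
--     return False
-- ===== SOURCE B (Python) =====
-- from math import isqrt
--
-- def is_nasty_number(n: int) -> bool:
--     """A value v is a sum of a factor pair of n iff v*v - 4*n is a perfect
--     square (then a,b = (v -+ sqrt(v*v-4*n))/2 are the factors).  So instead of
--     keeping sum and diff tables and intersecting them, test for each factor
--     pair (c, d) whether its difference d - c is such a sum, arithmetically."""
--     for c in range(1, isqrt(n) + 1):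
--         if n % c == 0:
--             v = n // c - c
--             s = v * v - 4 * n
--             if s >= 0:
--                 r = isqrt(s)
--                 if r * r == s:
--                     return True
--     return False
-- ===== Notes on version B (the rewrite author's own statement) =====
-- stated objective: alternative
-- what changed: B drops A's sum and diff hash sets entirely: using the identity that v is a factor-pair sum iff v*v-4n is a perfect square, it tests each pair's difference arithmetically with one isqrt, so no tables and no cross-membership test exist at all.
import Mathlib
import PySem

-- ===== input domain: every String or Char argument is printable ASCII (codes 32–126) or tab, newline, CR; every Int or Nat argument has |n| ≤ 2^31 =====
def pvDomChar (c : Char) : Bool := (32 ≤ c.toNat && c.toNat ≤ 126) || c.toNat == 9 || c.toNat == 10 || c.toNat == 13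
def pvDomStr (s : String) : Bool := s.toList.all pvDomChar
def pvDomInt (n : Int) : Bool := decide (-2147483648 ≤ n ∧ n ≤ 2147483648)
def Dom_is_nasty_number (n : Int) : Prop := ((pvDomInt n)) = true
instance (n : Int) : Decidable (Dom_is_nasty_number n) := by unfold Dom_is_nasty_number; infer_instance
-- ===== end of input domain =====

-- B replaces A's two hash sets and cross-membership test by a per-pair arithmetic
-- perfect-square test ((d-c)^2 - 4n square iff the difference is also a pair sum).

-- ===== PORT A =====
-- A's for-loop: state (sums, diffs), early return True on a hit
def aLoop (n : Int) : List Int → PySem.Set Int → PySem.Set Int → Bool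
  | [], _, _ => false
  | i :: rest, sums, diffs =>
    if PySem.Int.mod n i = 0 then
      let j := PySem.Int.floordiv n i
      let currSum := i + j
      let currDiff := |j - i|
      if PySem.Set.contains diffs currSum || PySem.Set.contains sums currDiff then true
      else aLoop n rest (PySem.Set.add sums currSum) (PySem.Set.add diffs currDiff)
    else aLoop n rest sums diffs

-- math.isqrt(n) = Nat.sqrt n.toNat (Pre_ requires 0 ≤ n, where isqrt would raise)
def is_nasty_number (n : Int) : Bool :=
  aLoop n (PySem.List.pyRange 1 ((Nat.sqrt n.toNat : Int) + 1) 1) PySem.Set.empty PySem.Set.empty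

-- ===== PORT B =====
-- Source B's for-loop: for each divisor c, test whether (n//c - c)^2 - 4n is a perfect square
def bLoop (n : Int) : List Int → Bool
  | [] => false
  | c :: rest =>
    if PySem.Int.mod n c = 0 then
      let v := PySem.Int.floordiv n c - c
      let s := v * v - 4 * n
      if 0 ≤ s then
        let r : Int := (Nat.sqrt s.toNat : Int)
        if r * r = s then true else bLoop n rest
      else bLoop n rest
    else bLoop n rest

def is_nasty_number_alt (n : Int) : Bool :=
  bLoop n (PySem.List.pyRange 1 ((Nat.sqrt n.toNat : Int) + 1) 1)

-- ===== PRECONDITION & SPEC =====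
-- math.isqrt raises ValueError for negative n, so A raises there; Pre_ excludes n < 0.
def Pre_is_nasty_number (n : Int) : Prop := 0 ≤ n
instance (n : Int) : Decidable (Pre_is_nasty_number n) := by unfold Pre_is_nasty_number; infer_instance
def pvWitness_is_nasty_number : Int := 9

def Spec_is_nasty_number (n : Int) (out : Bool) : Prop := out = is_nasty_number_alt n
instance (n : Int) (out : Bool) : Decidable (Spec_is_nasty_number n out) := by unfold Spec_is_nasty_number; infer_instance

-- ===== CLAIM (what is proved, stated in full; the proofs are below) =====
def Claim_equal_is_nasty_number : Prop := ∀ (n : Int), Dom_is_nasty_number n → Pre_is_nasty_number n → Spec_is_nasty_number n (is_nasty_number n)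

-- ===== LEMMAS AND PROOFS =====

-- a divisor index below the square root is at most its cofactor
theorem le_floordiv_self (n i : Int) (h1 : 1 ≤ i) (h2 : i * i ≤ n) : i ≤ PySem.Int.floordiv n i :=
  (PySem.Int.le_floordiv_iff_mul_le (by omega)).2 h2

-- A's loop returns True iff some divisor's sum matches some divisor's diff (either order),
-- or matches something in the seed sets
theorem aLoop_true_iff (n : Int) (l : List Int) (S D : PySem.Set Int)
    (hl : ∀ i ∈ l, 1 ≤ i ∧ i * i ≤ n) :
    (aLoop n l S D = true ↔
      ∃ i ∈ l, PySem.Int.mod n i = 0 ∧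
        (i + PySem.Int.floordiv n i ∈ D ∨ PySem.Int.floordiv n i - i ∈ S ∨
         ∃ k ∈ l, PySem.Int.mod n k = 0 ∧
           (i + PySem.Int.floordiv n i = PySem.Int.floordiv n k - k ∨
            PySem.Int.floordiv n i - i = k + PySem.Int.floordiv n k))) := by
  induction l generalizing S D with
  | nil => simp [aLoop]
  | cons i rest ih =>
    obtain ⟨hi1, hi2⟩ := hl i (List.mem_cons_self ..)
    have hrest : ∀ x ∈ rest, 1 ≤ x ∧ x * x ≤ n := fun x hx => hl x (List.mem_cons_of_mem _ hx)
    have hij : i ≤ PySem.Int.floordiv n i := le_floordiv_self n i hi1 hi2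
    have habs : |PySem.Int.floordiv n i - i| = PySem.Int.floordiv n i - i := abs_of_nonneg (by omega)
    by_cases hdvd : PySem.Int.mod n i = 0
    · simp only [aLoop, hdvd, if_true, habs]
      by_cases hD : i + PySem.Int.floordiv n i ∈ D
      · rw [if_pos (by simp [hD])]
        simp only [true_iff]
        exact ⟨i, List.mem_cons_self .., hdvd, Or.inl hD⟩
      · by_cases hS : PySem.Int.floordiv n i - i ∈ S
        · rw [if_pos (by simp [hS])]
          simp only [true_iff]
          exact ⟨i, List.mem_cons_self .., hdvd, Or.inr (Or.inl hS)⟩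
        · rw [if_neg (by simp [hD, hS])]
          rw [ih _ _ hrest]
          constructor
          · rintro ⟨x, hx, hxd, hcase⟩
            rcases hcase with hc | hc | ⟨k, hk, hkd, hc⟩
            · rw [PySem.Set.mem_add] at hc
              rcases hc with hc | hc
              · exact ⟨x, List.mem_cons_of_mem _ hx, hxd, Or.inl hc⟩
              · exact ⟨x, List.mem_cons_of_mem _ hx, hxd,
                  Or.inr (Or.inr ⟨i, List.mem_cons_self .., hdvd, Or.inl hc⟩)⟩
            · rw [PySem.Set.mem_add] at hc
              rcases hc with hc | hc
              · exact ⟨x, List.mem_cons_of_mem _ hx, hxd, Or.inr (Or.inl hc)⟩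
              · exact ⟨x, List.mem_cons_of_mem _ hx, hxd,
                  Or.inr (Or.inr ⟨i, List.mem_cons_self .., hdvd, Or.inr hc⟩)⟩
            · exact ⟨x, List.mem_cons_of_mem _ hx, hxd,
                Or.inr (Or.inr ⟨k, List.mem_cons_of_mem _ hk, hkd, hc⟩)⟩
          · rintro ⟨x, hx, hxd, hcase⟩
            rcases List.mem_cons.1 hx with rfl | hx'
            · -- x = i : only a cross pair can witness; a pair never matches itself (needs i = 0)
              rcases hcase with hc | hc | ⟨k, hk, hkd, hc⟩
              · exact absurd hc hD
              · exact absurd hc hS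
              · rcases List.mem_cons.1 hk with rfl | hk'
                · rcases hc with hc | hc <;> omega
                · rcases hc with hc | hc
                  · exact ⟨k, hk', hkd,
                      Or.inr (Or.inl (by rw [PySem.Set.mem_add]; exact Or.inr hc.symm))⟩
                  · exact ⟨k, hk', hkd,
                      Or.inl (by rw [PySem.Set.mem_add]; exact Or.inr hc.symm)⟩
            · refine ⟨x, hx', hxd, ?_⟩
              rcases hcase with hc | hc | ⟨k, hk, hkd, hc⟩
              · exact Or.inl (by rw [PySem.Set.mem_add]; exact Or.inl hc)
              · exact Or.inr (Or.inl (by rw [PySem.Set.mem_add]; exact Or.inl hc))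
              · rcases List.mem_cons.1 hk with rfl | hk'
                · rcases hc with hc | hc
                  · exact Or.inl (by rw [PySem.Set.mem_add]; exact Or.inr hc)
                  · exact Or.inr (Or.inl (by rw [PySem.Set.mem_add]; exact Or.inr hc))
                · exact Or.inr (Or.inr ⟨k, hk', hkd, hc⟩)
    · simp only [aLoop, hdvd, if_false]
      rw [ih _ _ hrest]
      constructor
      · rintro ⟨x, hx, hxd, hcase⟩
        refine ⟨x, List.mem_cons_of_mem _ hx, hxd, ?_⟩
        rcases hcase with hc | hc | ⟨k, hk, hkd, hc⟩
        · exact Or.inl hc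
        · exact Or.inr (Or.inl hc)
        · exact Or.inr (Or.inr ⟨k, List.mem_cons_of_mem _ hk, hkd, hc⟩)
      · rintro ⟨x, hx, hxd, hcase⟩
        rcases List.mem_cons.1 hx with rfl | hx'
        · exact absurd hxd hdvd
        refine ⟨x, hx', hxd, ?_⟩
        rcases hcase with hc | hc | ⟨k, hk, hkd, hc⟩
        · exact Or.inl hc
        · exact Or.inr (Or.inl hc)
        · rcases List.mem_cons.1 hk with rfl | hk'
          · exact absurd hkd hdvd
          · exact Or.inr (Or.inr ⟨k, hk', hkd, hc⟩)

-- i ≤ isqrt n ↔ i*i ≤ n, for 1 ≤ i and 0 ≤ n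
theorem le_sqrt_iff (n : Int) (hn : 0 ≤ n) (i : Int) (h1 : 1 ≤ i) :
    i ≤ (Nat.sqrt n.toNat : Int) ↔ i * i ≤ n := by
  have hi := Int.toNat_of_nonneg (by omega : (0:Int) ≤ i)
  rw [show i = (i.toNat : Int) from hi.symm, Nat.cast_le, Nat.le_sqrt]
  constructor
  · intro h3
    have : ((i.toNat * i.toNat : Nat) : Int) ≤ ((n.toNat : Nat) : Int) := Nat.cast_le.2 h3
    push_cast at this
    omega
  · intro h
    have : ((i.toNat * i.toNat : Nat) : Int) ≤ ((n.toNat : Nat) : Int) := by push_cast; omega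
    exact Nat.cast_le.1 this

-- common characterisation: some divisor pair's sum equals some divisor pair's diff
def Nasty (n : Int) : Prop :=
  ∃ i k : Int, (1 ≤ i ∧ i * i ≤ n ∧ PySem.Int.mod n i = 0) ∧
    (1 ≤ k ∧ k * k ≤ n ∧ PySem.Int.mod n k = 0) ∧
    i + PySem.Int.floordiv n i = PySem.Int.floordiv n k - k

theorem a_iff (n : Int) (hn : 0 ≤ n) : is_nasty_number n = true ↔ Nasty n := by
  unfold is_nasty_number
  have hmem : ∀ x : Int, x ∈ PySem.List.pyRange 1 ((Nat.sqrt n.toNat : Int) + 1) 1 ↔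
      1 ≤ x ∧ x * x ≤ n := by
    intro x
    rw [PySem.List.mem_pyRange_one]
    constructor
    · rintro ⟨h1, h2⟩
      exact ⟨h1, (le_sqrt_iff n hn x h1).1 (by omega)⟩
    · rintro ⟨h1, h2⟩
      exact ⟨h1, by have := (le_sqrt_iff n hn x h1).2 h2; omega⟩
  rw [aLoop_true_iff n _ _ _ (fun i hi => (hmem i).1 hi)]
  constructor
  · rintro ⟨i, hi, hid, hc⟩
    obtain ⟨hi1, hi2⟩ := (hmem i).1 hi
    rcases hc with hc | hc | ⟨k, hk, hkd, hc⟩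
    · simp [PySem.Set.empty] at hc
    · simp [PySem.Set.empty] at hc
    · obtain ⟨hk1, hk2⟩ := (hmem k).1 hk
      rcases hc with hc | hc
      · exact ⟨i, k, ⟨hi1, hi2, hid⟩, ⟨hk1, hk2, hkd⟩, hc⟩
      · exact ⟨k, i, ⟨hk1, hk2, hkd⟩, ⟨hi1, hi2, hid⟩, hc.symm⟩
  · rintro ⟨i, k, ⟨hi1, hi2, hid⟩, ⟨hk1, hk2, hkd⟩, hc⟩
    exact ⟨i, (hmem i).2 ⟨hi1, hi2⟩, hid,
      Or.inr (Or.inr ⟨k, (hmem k).2 ⟨hk1, hk2⟩, hkd, Or.inl hc⟩)⟩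

-- the arithmetic core: v = n//c - c is a factor-pair sum of n iff v^2 - 4n is a perfect square
theorem sq_cond_iff (n c : Int) (hc1 : 1 ≤ c) (hc2 : c * c ≤ n) (hcd : PySem.Int.mod n c = 0) :
    (0 ≤ (PySem.Int.floordiv n c - c) * (PySem.Int.floordiv n c - c) - 4 * n ∧
      ((Nat.sqrt ((PySem.Int.floordiv n c - c) * (PySem.Int.floordiv n c - c) - 4 * n).toNat : Int)
        * (Nat.sqrt ((PySem.Int.floordiv n c - c) * (PySem.Int.floordiv n c - c) - 4 * n).toNat : Int)
        = (PySem.Int.floordiv n c - c) * (PySem.Int.floordiv n c - c) - 4 * n))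
    ↔ ∃ a : Int, 1 ≤ a ∧ a * a ≤ n ∧ PySem.Int.mod n a = 0 ∧
        a + PySem.Int.floordiv n a = PySem.Int.floordiv n c - c := by
  set d := PySem.Int.floordiv n c with hd
  have hcdvd : c ∣ n := (PySem.Int.mod_eq_zero_iff_dvd n c).1 hcd
  have hn : n = c * d := by
    have h := PySem.Int.floordiv_mul_add_mod n c
    rw [hcd, add_zero] at h
    rw [← hd] at h
    linarith [mul_comm d c]
  have hcled : c ≤ d := le_floordiv_self n c hc1 hc2
  have hn1 : 1 ≤ n := by nlinarith
  set v := d - c with hv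
  have hv0 : 0 ≤ v := by omega
  constructor
  · rintro ⟨hs0, hsq⟩
    set s := v * v - 4 * n with hs
    set r : Int := (Nat.sqrt s.toNat : Int) with hr
    have hr0 : 0 ≤ r := by positivity
    -- r < v since r^2 = v^2 - 4n < v^2
    have hrv : r < v := by nlinarith
    -- parity: r ≡ v (mod 2) since r^2 ≡ v^2 (mod 2)
    have hpar : (v - r) % 2 = 0 := by
      have h2 : (r * r) % 2 = (v * v) % 2 := by
        have := hsq; omega
      rw [Int.mul_emod r r, Int.mul_emod v v] at h2
      have h3 : r % 2 = 0 ∨ r % 2 = 1 := by omega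
      have h4 : v % 2 = 0 ∨ v % 2 = 1 := by omega
      rcases h3 with h3 | h3 <;> rcases h4 with h4 | h4 <;> rw [h3, h4] at h2 <;> omega
    set a := (v - r) / 2 with ha
    set b := (v + r) / 2 with hb
    have hva : v - r = 2 * a := by omega
    have hvb : v + r = 2 * b := by omega
    have hab : a * b = n := by nlinarith
    have ha1 : 1 ≤ a := by nlinarith
    have hb1 : a ≤ b := by omega
    have haa : a * a ≤ n := by nlinarith
    have hadvd : PySem.Int.mod n a = 0 :=
      (PySem.Int.mod_eq_zero_iff_dvd n a).2 ⟨b, by omega⟩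
    have hfd : PySem.Int.floordiv n a = b := by
      rw [PySem.Int.floordiv_eq_iff_of_pos (by omega)]
      constructor <;> nlinarith
    exact ⟨a, ha1, haa, hadvd, by rw [hfd]; omega⟩
  · rintro ⟨a, ha1, haa, had, hav⟩
    have hadvd : a ∣ n := (PySem.Int.mod_eq_zero_iff_dvd n a).1 had
    set b := PySem.Int.floordiv n a with hb
    have hnab : n = a * b := by
      have h := PySem.Int.floordiv_mul_add_mod n a
      rw [had, add_zero] at h
      rw [← hb] at h
      linarith [mul_comm b a]
    have haleb : a ≤ b := le_floordiv_self n a ha1 haa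
    set r := b - a with hr
    have hr0 : 0 ≤ r := by omega
    have hs : v * v - 4 * n = r * r := by
      have : v = a + b := by omega
      rw [this]; rw [hnab]; ring
    refine ⟨by rw [hs]; positivity, ?_⟩
    have ht : (v * v - 4 * n).toNat = r.toNat * r.toNat := by
      rw [hs]
      rw [show r * r = ((r.toNat * r.toNat : Nat) : Int) by
        push_cast; rw [Int.toNat_of_nonneg hr0]]
      exact Int.toNat_natCast _
    rw [ht, Nat.sqrt_eq, hs]
    rw [Int.toNat_of_nonneg hr0]

-- B's loop returns True iff some element passes the divisor + perfect-square test
theorem bLoop_true_iff (n : Int) (l : List Int) :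
    bLoop n l = true ↔ ∃ c ∈ l, PySem.Int.mod n c = 0 ∧
      0 ≤ (PySem.Int.floordiv n c - c) * (PySem.Int.floordiv n c - c) - 4 * n ∧
      ((Nat.sqrt ((PySem.Int.floordiv n c - c) * (PySem.Int.floordiv n c - c) - 4 * n).toNat : Int)
        * (Nat.sqrt ((PySem.Int.floordiv n c - c) * (PySem.Int.floordiv n c - c) - 4 * n).toNat : Int)
        = (PySem.Int.floordiv n c - c) * (PySem.Int.floordiv n c - c) - 4 * n) := by
  induction l with
  | nil => simp [bLoop]
  | cons c rest ih =>
    simp only [bLoop]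
    split_ifs with h1 h2 h3
    · simp only [true_iff]
      exact ⟨c, List.mem_cons_self .., h1, h2, h3⟩
    · rw [ih]
      constructor
      · rintro ⟨x, hx, hh⟩; exact ⟨x, List.mem_cons_of_mem _ hx, hh⟩
      · rintro ⟨x, hx, hh⟩
        rcases List.mem_cons.1 hx with rfl | hx'
        · exact absurd hh.2.2 h3
        · exact ⟨x, hx', hh⟩
    · rw [ih]
      constructor
      · rintro ⟨x, hx, hh⟩; exact ⟨x, List.mem_cons_of_mem _ hx, hh⟩
      · rintro ⟨x, hx, hh⟩
        rcases List.mem_cons.1 hx with rfl | hx'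
        · exact absurd hh.2.1 h2
        · exact ⟨x, hx', hh⟩
    · rw [ih]
      constructor
      · rintro ⟨x, hx, hh⟩; exact ⟨x, List.mem_cons_of_mem _ hx, hh⟩
      · rintro ⟨x, hx, hh⟩
        rcases List.mem_cons.1 hx with rfl | hx'
        · exact absurd hh.1 h1
        · exact ⟨x, hx', hh⟩

theorem b_iff (n : Int) (hn : 0 ≤ n) : is_nasty_number_alt n = true ↔ Nasty n := by
  unfold is_nasty_number_alt
  have hmem : ∀ x : Int, x ∈ PySem.List.pyRange 1 ((Nat.sqrt n.toNat : Int) + 1) 1 ↔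
      1 ≤ x ∧ x * x ≤ n := by
    intro x
    rw [PySem.List.mem_pyRange_one]
    constructor
    · rintro ⟨h1, h2⟩
      exact ⟨h1, (le_sqrt_iff n hn x h1).1 (by omega)⟩
    · rintro ⟨h1, h2⟩
      exact ⟨h1, by have := (le_sqrt_iff n hn x h1).2 h2; omega⟩
  rw [bLoop_true_iff]
  constructor
  · rintro ⟨c, hc, hcd, hsq⟩
    obtain ⟨hc1, hc2⟩ := (hmem c).1 hc
    obtain ⟨a, ha1, haa, had, hav⟩ := (sq_cond_iff n c hc1 hc2 hcd).1 hsq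
    exact ⟨a, c, ⟨ha1, haa, had⟩, ⟨hc1, hc2, hcd⟩, hav⟩
  · rintro ⟨i, k, ⟨hi1, hi2, hid⟩, ⟨hk1, hk2, hkd⟩, hc⟩
    refine ⟨k, (hmem k).2 ⟨hk1, hk2⟩, hkd, ?_⟩
    exact (sq_cond_iff n k hk1 hk2 hkd).2 ⟨i, hi1, hi2, hid, hc⟩

-- ===== VERDICT (by name: the statement is the Claim_ definition above) =====
theorem is_nasty_number_spec : Claim_equal_is_nasty_number := by
  intro n _ hpre
  unfold Spec_is_nasty_number
  have hn : 0 ≤ n := hpre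
  have := (a_iff n hn).trans (b_iff n hn).symm
  cases h1 : is_nasty_number n <;> cases h2 : is_nasty_number_alt n <;> simp_all
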